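-- pv_equiv track=rewrite | github.com/purupurupu/kyopro | atcoder/ABC289/C.py | solve
-- ===== SOURCE A (Python) =====
-- def solve(n, m, s):
--     c = [0] * (n + 1)
--     for i in range(m):
--         for j in range(s[i][0]):
--             c[s[i][j + 1]] += 1
--     ans = 1
--     for i in range(1, n + 1):
--         if c[i] == 0:
--             return 0
--         ans *= c[i]
--     return ans
-- ===== SOURCE B (Python) =====
-- def solve(n, m, s):
--     ans = 1
--     for i in range(1, n + 1):
--         cnt = 0
--         for k in range(m):
--             row = s[k]
--             cnt += row[1:row[0] + 1].count(i)
--         if cnt == 0: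
--             return 0
--         ans *= cnt
--     return ans
-- ===== Notes on version B (the rewrite author's own statement) =====
-- stated objective: alternative
-- what changed: B drops A's shared tally array entirely: for each element i in 1..n it rescans all m sets and sums the occurrences of i in each set's listed slice s[k][1:s[k][0]+1], multiplying the per-element counts directly.
-- intended difference: On inputs whose listed elements include a value x in [-n,-1] (and every k in 1..n occurs either as k or as the wrapped k-(n+1)), A's c[x] += 1 silently wraps the negative element to index x+n+1 and inflates that coverage factor, so A returns a too-large product (2 at the witness); B counts only genuine occurrences of each k (1 at the witness), which is the intended coverage count. — e.g. on solve(1, 1, [[2, -1, 1]]): A returns 2, B returns 1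
-- outside the precondition, e.g. on solve(1, 1, [[-2, 1, 1]]): A returns 0, B returns 1
import Mathlib
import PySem

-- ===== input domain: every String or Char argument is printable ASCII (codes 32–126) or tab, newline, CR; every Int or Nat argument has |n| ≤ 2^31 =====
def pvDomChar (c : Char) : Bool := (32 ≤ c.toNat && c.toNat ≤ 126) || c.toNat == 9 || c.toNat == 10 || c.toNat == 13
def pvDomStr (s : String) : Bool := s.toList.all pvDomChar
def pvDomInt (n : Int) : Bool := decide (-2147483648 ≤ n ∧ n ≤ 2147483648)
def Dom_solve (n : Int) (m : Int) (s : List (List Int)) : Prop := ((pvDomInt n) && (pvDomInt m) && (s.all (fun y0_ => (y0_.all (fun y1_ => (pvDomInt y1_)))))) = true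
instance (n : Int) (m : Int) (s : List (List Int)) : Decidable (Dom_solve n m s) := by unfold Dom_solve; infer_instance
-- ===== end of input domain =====

-- B replaces A's shared tally array by a per-element rescan of the sets (an alternative
-- decomposition of the same product); A's negative-index wraparound is stated as D_solve below.

-- ===== PORT A =====
-- inner loop: for j in range(sz): c[row[j+1]] += 1   (none = IndexError)
def solveTallyInner (row : List Int) (sz : Int) (c : List Int) : Option (List Int) :=
  (PySem.List.pyRange 0 sz 1).foldl (fun acc j =>
    acc.bind (fun c =>
      (PySem.List.pyGet? row (j + 1)).bind (fun x =>
        (PySem.List.pyGet? c x).bind (fun v => PySem.List.pySet? c x (v + 1)))))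
    (some c)

-- outer loop: for i in range(m): for j in range(s[i][0]): c[s[i][j+1]] += 1
def solveTally (m : Int) (s : List (List Int)) (c : List Int) : Option (List Int) :=
  (PySem.List.pyRange 0 m 1).foldl (fun acc i =>
    acc.bind (fun c =>
      (PySem.List.pyGet? s i).bind (fun row =>
        (PySem.List.pyGet? row 0).bind (fun sz => solveTallyInner row sz c))))
    (some c)

def solve (n : Int) (m : Int) (s : List (List Int)) : Int :=
  match solveTally m s (List.replicate (n + 1).toNat 0) with
  | none => 0
  | some c =>
    -- ans = 1; for i in range(1, n+1): if c[i] == 0: return 0; ans *= c[i]   (none = the early return 0)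
    ((PySem.List.pyRange 1 (n + 1) 1).foldl (fun acc i =>
      match acc with
      | none => none
      | some ans =>
        if PySem.List.pyGetD c i 0 = 0 then none
        else some (ans * PySem.List.pyGetD c i 0)) (some 1)).getD 0

-- ===== PORT B =====
-- cnt = 0; for k in range(m): row = s[k]; cnt += row[1:row[0]+1].count(i)   (none = IndexError)
def solveAltCnt (m : Int) (s : List (List Int)) (i : Int) : Option Int :=
  (PySem.List.pyRange 0 m 1).foldl (fun acc k =>
    acc.bind (fun cnt =>
      (PySem.List.pyGet? s k).bind (fun row =>
        (PySem.List.pyGet? row 0).map (fun sz =>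
          cnt + ((PySem.List.slice row (some 1) (some (sz + 1))).count i : Int)))))
    (some 0)

def solve_alt (n : Int) (m : Int) (s : List (List Int)) : Int :=
  -- ans = 1; for i in range(1, n+1): cnt = …; if cnt == 0: return 0; ans *= cnt
  ((PySem.List.pyRange 1 (n + 1) 1).foldl (fun acc i =>
    match acc with
    | none => none
    | some ans =>
      match solveAltCnt m s i with
      | none => none
      | some cnt => if cnt = 0 then none else some (ans * cnt)) (some 1)).getD 0

-- ===== PRECONDITION & SPEC =====
-- the elements a row [sz, e1, e2, …] lists, namely e1 … e_sz
def rowElems (row : List Int) : List Int := row.tail.take (row.headD 0).toNat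
-- all elements listed by the first m rows, in tally order
def solveElems (m : Int) (s : List (List Int)) : List Int := (s.take m.toNat).flatMap rowElems

-- Pre_ = A returns normally (no IndexError): the m rows exist, each row is nonempty, its declared
-- size row[0] fits the row, and every listed element indexes the count array c of length n+1,
-- i.e. lies in [-(n+1), n].  Pre_ also restricts to the natural domain 0 ≤ row[0] for the declared
-- set size: on a negative row[0] A treats the row as empty while B's slice row[1:row[0]+1] reads
-- from the row's end (a concrete excluded example is in the claim cites).
def Pre_solve (n : Int) (m : Int) (s : List (List Int)) : Prop :=
  m.toNat ≤ s.length ∧ ∀ row ∈ s.take m.toNat,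
    row ≠ [] ∧ 0 ≤ row.headD 0 ∧ row.headD 0 ≤ (row.length : Int) - 1 ∧
    ∀ x ∈ rowElems row, -(n + 1) ≤ x ∧ x ≤ n
instance (n : Int) (m : Int) (s : List (List Int)) : Decidable (Pre_solve n m s) := by
  unfold Pre_solve; infer_instance

def pvWitness_solve : Int × Int × List (List Int) := (3, 2, [[2, 1, 3], [3, 2, 2, 3]])

-- On inputs whose listed elements include a value x in [-n,-1] (while every k in 1..n occurs among
-- the listed elements either as k or as the wrapped k-(n+1)), A's c[x] += 1 wraps the negative
-- element to index x+n+1 and inflates that coverage factor, so A returns a too-large product; B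
-- counts only genuine occurrences of each k in 1..n, which is the intended coverage count.
def D_solve (n : Int) (m : Int) (s : List (List Int)) : Prop :=
  (∃ x ∈ solveElems m s, -n ≤ x ∧ x ≤ -1) ∧
  ∀ k ∈ PySem.List.pyRange 1 (n + 1) 1, k ∈ solveElems m s ∨ (k - (n + 1)) ∈ solveElems m s
instance (n : Int) (m : Int) (s : List (List Int)) : Decidable (D_solve n m s) := by
  unfold D_solve; infer_instance

def Spec_solve (n : Int) (m : Int) (s : List (List Int)) (out : Int) : Prop :=
  ¬ D_solve n m s → out = solve_alt n m s
instance (n : Int) (m : Int) (s : List (List Int)) (out : Int) : Decidable (Spec_solve n m s out) := by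
  unfold Spec_solve; infer_instance

def pvDiffWitness_solve : Int × Int × List (List Int) := (1, 1, [[2, -1, 1]])
def pvDiffWitnessOut_solve : Int × Int := (2, 1)

-- ===== CLAIM (what is proved, stated in full; the proofs are below) =====
def Claim_unchanged_solve : Prop := ∀ (n : Int) (m : Int) (s : List (List Int)), Dom_solve n m s → Pre_solve n m s → Spec_solve n m s (solve n m s)
def Claim_changed_solve : Prop := Dom_solve (pvDiffWitness_solve.1) (pvDiffWitness_solve.2.1) (pvDiffWitness_solve.2.2) ∧ Pre_solve (pvDiffWitness_solve.1) (pvDiffWitness_solve.2.1) (pvDiffWitness_solve.2.2) ∧ D_solve (pvDiffWitness_solve.1) (pvDiffWitness_solve.2.1) (pvDiffWitness_solve.2.2) ∧ solve (pvDiffWitness_solve.1) (pvDiffWitness_solve.2.1) (pvDiffWitness_solve.2.2) = pvDiffWitnessOut_solve.1 ∧ solve_alt (pvDiffWitness_solve.1) (pvDiffWitness_solve.2.1) (pvDiffWitness_solve.2.2) = pvDiffWitnessOut_solve.2 ∧ pvDiffWitnessOut_solve.1 ≠ pvDiffWitnessOut_solve.2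
def Claim_exact_solve : Prop := ∀ (n : Int) (m : Int) (s : List (List Int)), Dom_solve n m s → Pre_solve n m s → D_solve n m s → solve n m s ≠ solve_alt n m s

-- ===== LEMMAS AND PROOFS =====

-- one tally step c[x] += 1, total form
def tallyStep (c : List Int) (x : Int) : List Int :=
  PySem.List.pySetD c x (PySem.List.pyGetD c x 0 + 1)

-- where Python's c[x] += 1 sends the (possibly negative) index x in a list of length L
def wrapI (L : Nat) (x : Int) : Int := if x < 0 then x + L else x

theorem length_tallyFold (xs : List Int) (c : List Int) :
    (xs.foldl tallyStep c).length = c.length := by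
  induction xs generalizing c with
  | nil => rfl
  | cons x xs ih =>
    simp [List.foldl_cons, ih, tallyStep, PySem.List.length_pySetD]

theorem pyGet?_of_inRange {c : List Int} {x : Int} (h : PySem.Raise.InRange c.length x) :
    PySem.List.pyGet? c x = some (PySem.List.pyGetD c x 0) := by
  obtain ⟨h1, h2⟩ := h
  simp [PySem.List.pyGet?, PySem.List.pyGetD, PySem.List.pyIdx?]
  split_ifs with hx
  · have : x.toNat < c.length := by omega
    simp [List.getElem?_eq_getElem this]
  · have : c.length - (-x).toNat < c.length := by omega
    simp [List.getElem?_eq_getElem this]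

theorem pySet?_of_inRange {c : List Int} {x : Int} (v : Int) (h : PySem.Raise.InRange c.length x) :
    PySem.List.pySet? c x v = some (PySem.List.pySetD c x v) := by
  obtain ⟨h1, h2⟩ := h
  simp [PySem.List.pySet?, PySem.List.pySetD, PySem.List.pyIdx?]
  split_ifs with hx <;> simp

theorem tallyInner_aux (h : Int) (t : List Int) (N : Nat) (c : List Int)
    (hN : N ≤ t.length)
    (h2 : ∀ x ∈ t.take N, PySem.Raise.InRange c.length x) :
    solveTallyInner (h :: t) (N : Int) c = some ((t.take N).foldl tallyStep c) := by
  induction N with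
  | zero => simp [solveTallyInner, PySem.List.pyRange_one_eq_nil]
  | succ N ih =>
    have hN' : N ≤ t.length := Nat.le_of_succ_le hN
    have hNlt : N < t.length := hN
    have hrng : PySem.List.pyRange 0 ((N:Int)+1) 1 = PySem.List.pyRange 0 (N:Int) 1 ++ [(N:Int)] := by
      exact PySem.List.pyRange_one_succ_right (by omega)
    have hcast : ((N+1 : Nat) : Int) = (N : Int) + 1 := by push_cast; ring
    unfold solveTallyInner
    rw [hcast, hrng, List.foldl_append]
    have hsub : ∀ x ∈ t.take N, x ∈ t.take (N+1) := by
      intro x hx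
      have : t.take N = (t.take (N+1)).take N := by rw [List.take_take]; simp
      rw [this] at hx
      exact List.mem_of_mem_take hx
    have ihh := ih hN' (fun x hx => h2 x (hsub x hx))
    unfold solveTallyInner at ihh
    rw [ihh]
    -- step at index N
    have htk : t.take (N+1) = t.take N ++ [t[N]] := List.take_succ_eq_append_getElem hNlt
    rw [htk, List.foldl_append]
    have hget : PySem.List.pyGet? (h :: t) ((N:Int) + 1) = some t[N] := by
      rw [PySem.List.pyGet?_cons_succ, PySem.List.pyGet?_natCast]
      simp [List.getElem?_eq_getElem hNlt]
    have hmem : t[N] ∈ t.take (N+1) := by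
      rw [htk]
      exact List.mem_append_right _ (List.mem_singleton_self _)
    have hx := h2 _ hmem
    have hlen : ((t.take N).foldl tallyStep c).length = c.length := length_tallyFold _ _
    have hx' : PySem.Raise.InRange ((t.take N).foldl tallyStep c).length t[N] := by rw [hlen]; exact hx
    simp only [List.foldl_cons, List.foldl_nil, Option.bind_some, hget,
      pyGet?_of_inRange hx', pySet?_of_inRange _ hx']
    rfl

theorem tallyInner_eq (row : List Int) (sz : Int) (c : List Int)
    (h0 : 0 ≤ sz) (h1 : sz ≤ (row.length : Int) - 1)
    (h2 : ∀ x ∈ row.tail.take sz.toNat, PySem.Raise.InRange c.length x) :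
    solveTallyInner row sz c = some ((row.tail.take sz.toNat).foldl tallyStep c) := by
  match row with
  | [] => exfalso; simp at h1; omega
  | h :: t =>
    have hsz : sz = ((sz.toNat : Nat) : Int) := by omega
    rw [hsz]
    exact tallyInner_aux h t sz.toNat c (by simp at h1; omega) (by simpa using h2)

theorem take_mono_mem {α : Type} (t : List α) (N : Nat) {x : α} (hx : x ∈ t.take N) :
    x ∈ t.take (N+1) := by
  have : t.take N = (t.take (N+1)).take N := by rw [List.take_take]; simp
  rw [this] at hx
  exact List.mem_of_mem_take hx

theorem tally_aux (s : List (List Int)) (N : Nat) (c : List Int)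
    (hN : N ≤ s.length)
    (hrows : ∀ row ∈ s.take N, row ≠ [] ∧ 0 ≤ row.headD 0 ∧ row.headD 0 ≤ (row.length : Int) - 1)
    (hR : ∀ x ∈ (s.take N).flatMap rowElems, PySem.Raise.InRange c.length x) :
    solveTally (N : Int) s c = some (((s.take N).flatMap rowElems).foldl tallyStep c) := by
  induction N with
  | zero => simp [solveTally, PySem.List.pyRange_one_eq_nil]
  | succ N ih =>
    have hN' : N ≤ s.length := Nat.le_of_succ_le hN
    have hNlt : N < s.length := hN
    have htk : s.take (N+1) = s.take N ++ [s[N]] := List.take_succ_eq_append_getElem hNlt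
    have hrng : PySem.List.pyRange 0 ((N:Int)+1) 1 = PySem.List.pyRange 0 (N:Int) 1 ++ [(N:Int)] :=
      PySem.List.pyRange_one_succ_right (by omega)
    have hcast : ((N+1 : Nat) : Int) = (N : Int) + 1 := by push_cast; ring
    unfold solveTally
    rw [hcast, hrng, List.foldl_append]
    have ihh := ih hN' (fun row hr => hrows row (take_mono_mem s N hr))
      (fun x hx => hR x (by
        rw [htk, List.flatMap_append]; exact List.mem_append_left _ hx))
    unfold solveTally at ihh
    rw [ihh]
    have hget : PySem.List.pyGet? s ((N:Int)) = some s[N] := by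
      rw [PySem.List.pyGet?_natCast]; simp [List.getElem?_eq_getElem hNlt]
    have hmemN : s[N] ∈ s.take (N+1) := by
      rw [htk]; exact List.mem_append_right _ (List.mem_singleton_self _)
    obtain ⟨hne, hsz0, hsz1⟩ := hrows _ hmemN
    have hget0 : PySem.List.pyGet? s[N] 0 = some (s[N].headD 0) := by
      match s[N], hne with
      | a :: r, _ => simp
    have hlen : (((s.take N).flatMap rowElems).foldl tallyStep c).length = c.length :=
      length_tallyFold _ _
    have hinner := tallyInner_eq s[N] (s[N].headD 0) (((s.take N).flatMap rowElems).foldl tallyStep c)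
      hsz0 hsz1 (by
        intro x hx
        rw [hlen]
        refine hR x (by rw [htk, List.flatMap_append]; refine List.mem_append_right _ ?_; simpa [rowElems] using hx))
    simp only [List.foldl_cons, List.foldl_nil, Option.bind_some, hget, hget0, hinner]
    rw [htk, List.flatMap_append, List.foldl_append]
    simp [rowElems]

theorem pyRange_zero_toNat (m : Int) :
    PySem.List.pyRange 0 m 1 = PySem.List.pyRange 0 ((m.toNat : Nat) : Int) 1 := by
  by_cases h : 0 ≤ m
  · congr 1; omega
  · rw [PySem.List.pyRange_one_eq_nil (by omega), PySem.List.pyRange_one_eq_nil (by omega)]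

theorem tally_eq (n : Int) (m : Int) (s : List (List Int)) (c : List Int)
    (hp : Pre_solve n m s)
    (hR : ∀ x ∈ solveElems m s, PySem.Raise.InRange c.length x) :
    solveTally m s c = some ((solveElems m s).foldl tallyStep c) := by
  obtain ⟨hm, hrows⟩ := hp
  have : solveTally m s c = solveTally ((m.toNat : Nat) : Int) s c := by
    unfold solveTally; rw [pyRange_zero_toNat]
  rw [this]
  exact tally_aux s m.toNat c hm (fun row hr => ⟨(hrows row hr).1, (hrows row hr).2.1, (hrows row hr).2.2.1⟩) hR

-- where Python's c[x] += 1 sends the (possibly negative) index x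

theorem pyIdx?_wrap (L : Nat) (x : Int) (h : PySem.Raise.InRange L x) :
    PySem.List.pyIdx? L x = some (wrapI L x).toNat := by
  obtain ⟨h1, h2⟩ := h
  simp only [PySem.List.pyIdx?, wrapI]
  split_ifs <;> first | rfl | omega | (congr 1; omega)

theorem pySetD_wrap (c : List Int) (x v : Int) (h : PySem.Raise.InRange c.length x) :
    PySem.List.pySetD c x v = c.set (wrapI c.length x).toNat v := by
  simp [PySem.List.pySetD, PySem.List.pySet?, pyIdx?_wrap _ _ h]

theorem pyGetD_wrap (c : List Int) (x d : Int) (h : PySem.Raise.InRange c.length x) :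
    PySem.List.pyGetD c x d = c.getD (wrapI c.length x).toNat d := by
  simp [PySem.List.pyGetD, PySem.List.pyGet?, pyIdx?_wrap _ _ h, List.getD_eq_getElem?_getD]

theorem wrapI_lt (L : Nat) (x : Int) (h : PySem.Raise.InRange L x) :
    0 ≤ wrapI L x ∧ wrapI L x < L := by
  obtain ⟨h1, h2⟩ := h
  unfold wrapI; split_ifs <;> omega

theorem tally_count (xs : List Int) (c : List Int) (k : Int)
    (hx : ∀ x ∈ xs, PySem.Raise.InRange c.length x)
    (hk0 : 0 ≤ k) (hk1 : k < (c.length : Int)) :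
    PySem.List.pyGetD (xs.foldl tallyStep c) k 0
      = PySem.List.pyGetD c k 0 + (xs.countP (fun x => wrapI c.length x == k) : Int) := by
  induction xs generalizing c with
  | nil => simp
  | cons x xs ih =>
    have hxr := hx x (List.mem_cons_self)
    have hlen : (tallyStep c x).length = c.length := by
      simp [tallyStep, PySem.List.length_pySetD]
    have hkr : PySem.Raise.InRange c.length k := ⟨by omega, hk1⟩
    have hstep : PySem.List.pyGetD (tallyStep c x) k 0
          = PySem.List.pyGetD c k 0 + (if wrapI c.length x == k then 1 else 0) := by
      rw [tallyStep, pySetD_wrap c x _ hxr,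
        show PySem.List.pyGetD (c.set (wrapI c.length x).toNat (PySem.List.pyGetD c x 0 + 1)) k 0
           = (c.set (wrapI c.length x).toNat (PySem.List.pyGetD c x 0 + 1)).getD k.toNat 0 by
          rw [pyGetD_wrap _ k 0 (by simp; exact hkr)]
          congr 1
          unfold wrapI; simp; omega,
        pyGetD_wrap c k 0 hkr, pyGetD_wrap c x 0 hxr]
      have hw := wrapI_lt c.length x hxr
      have hkw : wrapI c.length k = k := by unfold wrapI; split_ifs <;> omega
      rw [hkw]
      by_cases heq : wrapI c.length x = k
      · have hklen : k.toNat < c.length := by omega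
        rw [heq]
        simp [List.getD_eq_getElem?_getD, hklen]
      · have hnat : (wrapI c.length x).toNat ≠ k.toNat := by omega
        simp [List.getD_eq_getElem?_getD, List.getElem?_set_ne hnat, heq]
    rw [List.foldl_cons, ih (tallyStep c x) (by rw [hlen]; exact fun y hy => hx y (List.mem_cons_of_mem _ hy)) (by omega), hstep, hlen]
    simp only [List.countP_cons]
    by_cases hc : wrapI c.length x == k <;> simp [hc] <;> push_cast <;> ring

theorem earlyFold_none (l : List Int) (g : Int → Int) :
    (l.foldl (fun acc i =>
        match acc with
        | none => none
        | some ans => if g i = 0 then none else some (ans * g i)) (none : Option Int)) = none := by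
  induction l with
  | nil => rfl
  | cons x l ih => simpa using ih

theorem earlyFold_aux (l : List Int) (g : Int → Int) (a : Int) :
    (l.foldl (fun acc i =>
        match acc with
        | none => none
        | some ans => if g i = 0 then none else some (ans * g i)) (some a))
      = if ∀ i ∈ l, g i ≠ 0 then some (a * (l.map g).prod) else none := by
  induction l generalizing a with
  | nil => simp
  | cons x l ih =>
    simp only [List.foldl_cons]
    by_cases hx : g x = 0
    · show (l.foldl (fun acc i =>
          match acc with
          | none => none
          | some ans => if g i = 0 then none else some (ans * g i))
          (if g x = 0 then none else some (a * g x))) = _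
      rw [if_pos hx, earlyFold_none l g]
      have hn : ¬ ∀ i ∈ x :: l, g i ≠ 0 := fun h => (h x List.mem_cons_self) hx
      simp only [if_neg hn]
    · rw [if_neg hx, ih]
      by_cases hall : ∀ i ∈ l, g i ≠ 0
      · have : ∀ i ∈ x :: l, g i ≠ 0 := by
          intro i hi; rcases List.mem_cons.mp hi with rfl | hi
          · exact hx
          · exact hall i hi
        simp [hall, this, mul_assoc]
      · have : ¬ ∀ i ∈ x :: l, g i ≠ 0 := by
          intro h; exact hall (fun i hi => h i (List.mem_cons_of_mem _ hi))
        simp [hall, this]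

theorem earlyFold (l : List Int) (g : Int → Int) :
    ((l.foldl (fun acc i =>
        match acc with
        | none => none
        | some ans => if g i = 0 then none else some (ans * g i)) (some 1)).getD 0)
      = (l.map g).prod := by
  rw [earlyFold_aux]
  by_cases hall : ∀ i ∈ l, g i ≠ 0
  · rw [if_pos hall]; simp
  · rw [if_neg hall]
    have hex : ∃ i ∈ l, g i = 0 := by simpa [not_forall] using hall
    obtain ⟨i, hi, hgi⟩ := hex
    have h0 : (0 : Int) ∈ l.map g := List.mem_map.mpr ⟨i, hi, hgi⟩
    simp [List.prod_eq_zero h0]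

theorem altCnt_aux (s : List (List Int)) (N : Nat) (i : Int)
    (hN : N ≤ s.length)
    (hrows : ∀ row ∈ s.take N, row ≠ [] ∧ 0 ≤ row.headD 0 ∧ row.headD 0 ≤ (row.length : Int) - 1) :
    solveAltCnt (N : Int) s i = some ((((s.take N).flatMap rowElems).count i : Int)) := by
  induction N with
  | zero => simp [solveAltCnt, PySem.List.pyRange_one_eq_nil]
  | succ N ih =>
    have hN' : N ≤ s.length := Nat.le_of_succ_le hN
    have hNlt : N < s.length := hN
    have htk : s.take (N+1) = s.take N ++ [s[N]] := List.take_succ_eq_append_getElem hNlt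
    have hrng : PySem.List.pyRange 0 ((N:Int)+1) 1 = PySem.List.pyRange 0 (N:Int) 1 ++ [(N:Int)] :=
      PySem.List.pyRange_one_succ_right (by omega)
    have hcast : ((N+1 : Nat) : Int) = (N : Int) + 1 := by push_cast; ring
    unfold solveAltCnt
    rw [hcast, hrng, List.foldl_append]
    have ihh := ih hN' (fun row hr => hrows row (take_mono_mem s N hr))
    unfold solveAltCnt at ihh
    rw [ihh]
    have hget : PySem.List.pyGet? s ((N:Int)) = some s[N] := by
      rw [PySem.List.pyGet?_natCast]; simp [List.getElem?_eq_getElem hNlt]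
    have hmemN : s[N] ∈ s.take (N+1) := by
      rw [htk]; exact List.mem_append_right _ (List.mem_singleton_self _)
    obtain ⟨hne, hsz0, hsz1⟩ := hrows _ hmemN
    have hget0 : PySem.List.pyGet? s[N] 0 = some (s[N].headD 0) := by
      match s[N], hne with
      | a :: r, _ => simp
    have hslice : PySem.List.slice s[N] (some 1) (some (s[N].headD 0 + 1)) = rowElems s[N] := by
      rw [PySem.List.slice_toNat s[N] (show (0:Int) ≤ 1 by omega) (show (0:Int) ≤ s[N].headD 0 + 1 by omega)]
      rw [rowElems, ← List.drop_one]
      congr 1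
      omega
    simp only [List.foldl_cons, List.foldl_nil, Option.bind_some, hget, hget0, Option.map_some,
      hslice]
    rw [htk, List.flatMap_append]
    simp [List.count_append]

theorem altCnt_eq (n : Int) (m : Int) (s : List (List Int)) (i : Int)
    (hp : Pre_solve n m s) :
    solveAltCnt m s i = some (((solveElems m s).count i : Int)) := by
  obtain ⟨hm, hrows⟩ := hp
  have h1 : solveAltCnt m s i = solveAltCnt ((m.toNat : Nat) : Int) s i := by
    unfold solveAltCnt; rw [pyRange_zero_toNat]
  rw [h1, solveElems]
  exact altCnt_aux s m.toNat i hm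
    (fun row hr => ⟨(hrows row hr).1, (hrows row hr).2.1, (hrows row hr).2.2.1⟩)

theorem elems_bounds (n : Int) (m : Int) (s : List (List Int)) (hp : Pre_solve n m s) :
    ∀ x ∈ solveElems m s, -(n + 1) ≤ x ∧ x ≤ n := by
  intro x hx
  obtain ⟨hm, hrows⟩ := hp
  rw [solveElems] at hx
  obtain ⟨row, hrow, hxr⟩ := List.mem_flatMap.mp hx
  exact (hrows row hrow).2.2.2 x hxr

theorem solve_eq_prod (n : Int) (m : Int) (s : List (List Int)) (hp : Pre_solve n m s) :
    solve n m s = ((PySem.List.pyRange 1 (n + 1) 1).map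
      (fun i => (((solveElems m s).countP (fun x => wrapI (n + 1).toNat x == i) : Nat) : Int))).prod := by
  have hR : ∀ x ∈ solveElems m s,
      PySem.Raise.InRange (List.replicate (n + 1).toNat (0 : Int)).length x := by
    intro x hx
    have hb := elems_bounds n m s hp x hx
    constructor <;> simp <;> omega
  unfold solve
  rw [tally_eq n m s _ hp hR]
  show ((PySem.List.pyRange 1 (n + 1) 1).foldl (fun acc i =>
      match acc with
      | none => none
      | some ans =>
        if PySem.List.pyGetD ((solveElems m s).foldl tallyStep (List.replicate (n + 1).toNat 0)) i 0 = 0 then none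
        else some (ans * PySem.List.pyGetD ((solveElems m s).foldl tallyStep (List.replicate (n + 1).toNat 0)) i 0)) (some 1)).getD 0 = _
  rw [earlyFold _ (fun i => PySem.List.pyGetD ((solveElems m s).foldl tallyStep (List.replicate (n + 1).toNat 0)) i 0)]
  apply congrArg List.prod
  apply List.map_eq_map_iff.mpr
  intro i hi
  obtain ⟨hi1, hi2⟩ := (PySem.List.mem_pyRange_one).mp hi
  have hlen : (List.replicate (n + 1).toNat (0 : Int)).length = (n + 1).toNat := by simp
  have hcount := tally_count (solveElems m s) (List.replicate (n + 1).toNat 0) i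
    (fun x hx => by
      have hb := elems_bounds n m s hp x hx
      constructor <;> simp <;> omega)
    (by omega) (by simp; omega)
  rw [hcount, hlen]
  have h0 : PySem.List.pyGetD (List.replicate (n + 1).toNat (0 : Int)) i 0 = 0 := by
    rw [pyGetD_wrap _ i 0 (by rw [hlen]; constructor <;> omega)]
    simp [List.getD_eq_getElem?_getD, List.getElem?_replicate]
    split_ifs <;> rfl
  rw [h0, zero_add]

theorem solve_alt_eq_prod (n : Int) (m : Int) (s : List (List Int)) (hp : Pre_solve n m s) :
    solve_alt n m s = ((PySem.List.pyRange 1 (n + 1) 1).map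
      (fun i => (((solveElems m s).count i : Nat) : Int))).prod := by
  unfold solve_alt
  have hC : ∀ i, solveAltCnt m s i = some (((solveElems m s).count i : Int)) :=
    fun i => altCnt_eq n m s i hp
  simp only [hC]
  exact earlyFold _ _

theorem prod_le_prod_map (r : List Int) (f g : Int → Int)
    (h0 : ∀ i ∈ r, 0 ≤ f i) (h1 : ∀ i ∈ r, f i ≤ g i) :
    (r.map f).prod ≤ (r.map g).prod := by
  induction r with
  | nil => simp
  | cons a r ih =>
    simp only [List.map_cons, List.prod_cons]
    have hfa := h0 a List.mem_cons_self
    have hga := h1 a List.mem_cons_self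
    have hPf : 0 ≤ (r.map f).prod :=
      List.prod_nonneg (fun x hx => by
        obtain ⟨i, hi, rfl⟩ := List.mem_map.mp hx
        exact h0 i (List.mem_cons_of_mem _ hi))
    have hle := ih (fun i hi => h0 i (List.mem_cons_of_mem _ hi))
      (fun i hi => h1 i (List.mem_cons_of_mem _ hi))
    nlinarith

theorem prod_lt_prod_map (r : List Int) (f g : Int → Int) (k0 : Int)
    (h1 : ∀ i ∈ r, 1 ≤ f i) (h2 : ∀ i ∈ r, f i ≤ g i)
    (hk : k0 ∈ r) (hs : f k0 < g k0) :
    (r.map f).prod < (r.map g).prod := by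
  induction r with
  | nil => exact absurd hk (List.not_mem_nil)
  | cons a r ih =>
    simp only [List.map_cons, List.prod_cons]
    have hfa := h1 a List.mem_cons_self
    have hga := h2 a List.mem_cons_self
    have hPf : 1 ≤ (r.map f).prod :=
      List.one_le_prod (fun x hx => by
        obtain ⟨i, hi, rfl⟩ := List.mem_map.mp hx
        exact h1 i (List.mem_cons_of_mem _ hi))
    have hle := prod_le_prod_map r f g
      (fun i hi => le_trans zero_le_one (h1 i (List.mem_cons_of_mem _ hi)))
      (fun i hi => h2 i (List.mem_cons_of_mem _ hi))
    rcases List.mem_cons.mp hk with rfl | hk'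
    · nlinarith
    · have hlt := ih (fun i hi => h1 i (List.mem_cons_of_mem _ hi))
        (fun i hi => h2 i (List.mem_cons_of_mem _ hi)) hk'
      nlinarith

theorem count_add_count_le_countP (l : List Int) (p : Int → Bool) (a b : Int)
    (hab : a ≠ b) (hpa : p a) (hpb : p b) :
    l.count a + l.count b ≤ l.countP p := by
  induction l with
  | nil => simp
  | cons x l ih =>
    rw [List.count_cons, List.count_cons, List.countP_cons]
    by_cases hxa : x = a
    · have hpx : p x = true := by rw [hxa]; exact hpa
      have hxb : ¬ (x = b) := by rw [hxa]; exact hab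
      simp [hxa, hxb, hpa, hab]
      omega
    · by_cases hxb : x = b
      · have hpx : p x = true := by rw [hxb]; exact hpb
        have hba : ¬ (b = a) := fun h => hab h.symm
        simp [hxb, hpb, hba]
        omega
      · simp [hxa, hxb]
        split_ifs <;> omega

theorem solve_AB_eq : ∀ (n : Int) (m : Int) (s : List (List Int)),
    Pre_solve n m s → ¬ D_solve n m s → solve n m s = solve_alt n m s := by
  intro n m s hp hnd
  rw [solve_eq_prod n m s hp, solve_alt_eq_prod n m s hp]
  unfold D_solve at hnd
  rw [not_and_or] at hnd
  rcases hnd with hneg | hcov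
  · have hneg' : ∀ x ∈ solveElems m s, ¬(-n ≤ x ∧ x ≤ -1) := by simpa using hneg
    apply congrArg List.prod
    apply List.map_eq_map_iff.mpr
    intro i hi
    obtain ⟨hi1, hi2⟩ := (PySem.List.mem_pyRange_one).mp hi
    congr 1
    rw [List.count_eq_countP]
    apply List.countP_congr
    intro x hx
    have hb := elems_bounds n m s hp x hx
    have hnx := hneg' x hx
    have hL : ((n + 1).toNat : Int) = n + 1 := by omega
    unfold wrapI
    constructor
    · intro h
      have h' : (if x < 0 then x + ((n+1).toNat : Int) else x) = i := by simpa using h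
      simp only [beq_iff_eq]
      split_ifs at h' with hx0 <;> omega
    · intro h
      have h' : x = i := by simpa using h
      simp only [beq_iff_eq]
      split_ifs with hx0 <;> omega
  · have hcov' : ∃ k, 1 ≤ k ∧ k ≤ n ∧ k ∉ solveElems m s ∧ (k - (n + 1)) ∉ solveElems m s := by
      simpa [not_forall] using hcov
    obtain ⟨k, hka, hkb', hk1, hk2⟩ := hcov'
    have hk : k ∈ PySem.List.pyRange 1 (n + 1) 1 :=
      (PySem.List.mem_pyRange_one).mpr ⟨hka, by omega⟩
    have hL : ((n + 1).toNat : Int) = n + 1 := by omega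
    have hA : (solveElems m s).countP (fun x => wrapI (n + 1).toNat x == k) = 0 := by
      apply List.countP_eq_zero.mpr
      intro x hx
      have hb := elems_bounds n m s hp x hx
      simp only [beq_iff_eq]
      unfold wrapI
      split_ifs with hx0
      · intro h; exact hk2 (by rw [show k - (n+1) = x by omega]; exact hx)
      · intro h; exact hk1 (h ▸ hx)
    have hB : (solveElems m s).count k = 0 := by
      rw [List.count_eq_zero]; exact hk1
    rw [List.prod_eq_zero (List.mem_map.mpr ⟨k, hk, by rw [hA]; rfl⟩),
        List.prod_eq_zero (List.mem_map.mpr ⟨k, hk, by rw [hB]; rfl⟩)]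

theorem solve_AB_ne : ∀ (n : Int) (m : Int) (s : List (List Int)),
    Pre_solve n m s → D_solve n m s → solve n m s ≠ solve_alt n m s := by
  intro n m s hp hd
  rw [solve_eq_prod n m s hp, solve_alt_eq_prod n m s hp]
  obtain ⟨⟨x0, hx0E, hx0a, hx0b⟩, hcov⟩ := hd
  have hb0 := elems_bounds n m s hp x0 hx0E
  have hn1 : 1 ≤ n := by omega
  have hL : ((n + 1).toNat : Int) = n + 1 := by omega
  set E := solveElems m s with hE
  set r := PySem.List.pyRange 1 (n + 1) 1 with hr
  set fB : Int → Int := fun i => ((E.count i : Nat) : Int) with hfB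
  set fA : Int → Int := fun i => ((E.countP (fun x => wrapI (n + 1).toNat x == i) : Nat) : Int) with hfA
  have h1 : ∀ i ∈ r, 1 ≤ fA i := by
    intro i hi
    obtain ⟨hi1, hi2⟩ := (PySem.List.mem_pyRange_one).mp hi
    have : 0 < E.countP (fun x => wrapI (n + 1).toNat x == i) := by
      apply List.countP_pos_iff.mpr
      rcases hcov i hi with hiE | hiE
      · exact ⟨i, hiE, by simp only [beq_iff_eq]; unfold wrapI; split_ifs <;> omega⟩
      · exact ⟨i - (n + 1), hiE, by simp only [beq_iff_eq]; unfold wrapI; split_ifs <;> omega⟩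
    simp only [hfA]
    omega
  have h2 : ∀ i ∈ r, fB i ≤ fA i := by
    intro i hi
    obtain ⟨hi1, hi2⟩ := (PySem.List.mem_pyRange_one).mp hi
    simp only [hfA, hfB]
    have : E.count i ≤ E.countP (fun x => wrapI (n + 1).toNat x == i) := by
      rw [List.count_eq_countP]
      apply List.countP_mono_left
      intro x hx h
      have hxi : x = i := by simpa using h
      simp only [beq_iff_eq]; unfold wrapI; split_ifs <;> omega
    omega
  set k0 : Int := x0 + (n + 1) with hk0
  have hk0r : k0 ∈ r := (PySem.List.mem_pyRange_one).mpr (by omega)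
  have hstrict : fB k0 < fA k0 := by
    have hcc := count_add_count_le_countP E (fun x => wrapI (n + 1).toNat x == k0) k0 x0
      (by omega) (by simp only [beq_iff_eq]; unfold wrapI; split_ifs <;> omega)
      (by simp only [beq_iff_eq]; unfold wrapI; split_ifs <;> omega)
    have hx0c : 0 < E.count x0 := List.count_pos_iff.mpr hx0E
    simp only [hfA, hfB]
    omega
  apply ne_of_gt
  by_cases hz : ∃ i ∈ r, fB i = 0
  · obtain ⟨i0, hi0r, hi00⟩ := hz
    have hB0 : (r.map fB).prod = 0 :=
      List.prod_eq_zero (List.mem_map.mpr ⟨i0, hi0r, hi00⟩)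
    have hA0 : 0 < (r.map fA).prod :=
      List.prod_pos (fun x hx => by
        obtain ⟨i, hi, rfl⟩ := List.mem_map.mp hx
        exact lt_of_lt_of_le zero_lt_one (h1 i hi))
    omega
  · have hz' : ∀ i ∈ r, 1 ≤ fB i := by
      intro i hi
      have h0 : ¬ fB i = 0 := fun h => hz ⟨i, hi, h⟩
      have : (0:Int) ≤ fB i := by simp [hfB]
      omega
    exact prod_lt_prod_map r fB fA k0 hz' h2 hk0r hstrict


-- ===== VERDICT (by name: the statement is the Claim_ definition above) =====
theorem solve_spec : Claim_unchanged_solve := by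
  intro n m s _ hp
  unfold Spec_solve
  intro hnd
  exact solve_AB_eq n m s hp hnd

theorem solve_changed : Claim_changed_solve := by unfold Claim_changed_solve; decide

theorem solve_tight : Claim_exact_solve := by
  intro n m s _ hp hd
  exact solve_AB_ne n m s hp hd
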